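-- pv_equiv track=rewrite | github.com/gnohead/strays | app/framework/tools.py | transform
-- ===== SOURCE A (Python) =====
-- def transform(text: str, encode: bool = True) -> str:
--     """
--     주어진 문자열의 각 문자를 변환합니다.
--     소문자는 'a'에서 'z'까지 순환하며, 대문자는 'A'에서 'Z'까지 순환합니다.
--     숫자는 '0'에서 '9'까지 순환합니다. 알파벳이나 숫자가 아닌 문자는 그대로 유지됩니다.
--     encode가 True이면 인코딩, False이면 디코딩을 수행합니다.
--
--     Args:
--         text (str): 변환할 문자열
--         encode (bool): 인코딩 여부 (기본값: True)
--
--     Returns: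
--         str: 변환된 문자열
--     """
--     shift = 1 if encode else -1
--     return ''.join(
--         chr((ord(char) - ord('a') + shift) % 26 + ord('a')) if 'a' <= char <= 'z' else
--         chr((ord(char) - ord('A') + shift) % 26 + ord('A')) if 'A' <= char <= 'Z' else
--         chr((ord(char) - ord('0') + shift) % 10 + ord('0')) if '0' <= char <= '9' else
--         char
--         for char in text
--     )
-- ===== SOURCE B (Python) =====
-- def transform(text: str, encode: bool = True) -> str:
--     # Three staged passes, one per character class. Each pass aligns the class's
--     # cycle string with a rotation of itself and swaps every occurrence; the
--     # classes are closed under rotation and pairwise disjoint, so later passes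
--     # never disturb characters rewritten by earlier ones.
--     for cycle in ("abcdefghijklmnopqrstuvwxyz",
--                   "ABCDEFGHIJKLMNOPQRSTUVWXYZ",
--                   "0123456789"):
--         rolled = cycle[1:] + cycle[:1] if encode else cycle[-1:] + cycle[:-1]
--         text = ''.join(rolled[cycle.find(c)] if c in cycle else c for c in text)
--     return text
-- ===== Notes on version B (the rewrite author's own statement) =====
-- stated objective: alternative
-- what changed: Replaces A's single pass of per-character branch-and-modular-arithmetic by three staged passes over the text, one per character class, each pass aligning the class's cycle string with a rotation of itself (cycle[1:]+cycle[:1] or cycle[-1:]+cycle[:-1]) and substituting via string search instead of ord arithmetic.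
import Mathlib
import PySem

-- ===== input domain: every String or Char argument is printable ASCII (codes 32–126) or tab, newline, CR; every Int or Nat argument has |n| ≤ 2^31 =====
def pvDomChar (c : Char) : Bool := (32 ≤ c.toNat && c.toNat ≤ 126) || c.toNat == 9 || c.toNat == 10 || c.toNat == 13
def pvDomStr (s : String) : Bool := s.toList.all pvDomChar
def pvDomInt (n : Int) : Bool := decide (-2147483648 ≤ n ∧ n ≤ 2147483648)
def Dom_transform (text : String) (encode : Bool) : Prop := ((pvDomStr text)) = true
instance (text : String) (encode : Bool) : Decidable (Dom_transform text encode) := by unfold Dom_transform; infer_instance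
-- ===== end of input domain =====

-- B replaces A's single pass of per-character branch arithmetic by three staged passes,
-- one per character class, each swapping the class's cycle string with a rotation of itself
-- (alternative decomposition; same O(n) cost).

-- ===== PORT A =====
-- per-character transform of A's conditional expression chain
def transformChar (shift : Int) (c : Char) : Char :=
  if 'a' ≤ c ∧ c ≤ 'z' then Char.ofNat (PySem.Int.mod ((c.toNat : Int) - 97 + shift) 26 + 97).toNat
  else if 'A' ≤ c ∧ c ≤ 'Z' then Char.ofNat (PySem.Int.mod ((c.toNat : Int) - 65 + shift) 26 + 65).toNat
  else if '0' ≤ c ∧ c ≤ '9' then Char.ofNat (PySem.Int.mod ((c.toNat : Int) - 48 + shift) 10 + 48).toNat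
  else c

def transform (text : String) (encode : Bool) : String :=
  let shift : Int := if encode then 1 else -1
  String.mk (text.toList.map (transformChar shift))

-- ===== PORT B =====
-- one staged pass: rolled = cycle[1:]+cycle[:1] (encode) or cycle[-1:]+cycle[:-1] (decode);
-- then ''.join(rolled[cycle.find(c)] if c in cycle else c for c in text)
def rollPass (encode : Bool) (text : List Char) (cycle : List Char) : List Char :=
  let rolled :=
    if encode then PySem.List.slice cycle (some 1) none ++ PySem.List.slice cycle none (some 1)
    else PySem.List.slice cycle (some (-1)) none ++ PySem.List.slice cycle none (some (-1))
  -- rolled[i] with i = cycle.find(c): membership guarantees 0 ≤ i < rolled.length, so pyGetD is exact here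
  text.map (fun c => if PySem.Chars.isIn [c] cycle then PySem.List.pyGetD rolled (PySem.Chars.find cycle [c]) c else c)

def transform_alt (text : String) (encode : Bool) : String :=
  String.mk
    (["abcdefghijklmnopqrstuvwxyz".toList,
      "ABCDEFGHIJKLMNOPQRSTUVWXYZ".toList,
      "0123456789".toList].foldl (rollPass encode) text.toList)

-- ===== PRECONDITION & SPEC =====
def Spec_transform (text : String) (encode : Bool) (out : String) : Prop := out = transform_alt text encode
instance (text : String) (encode : Bool) (out : String) : Decidable (Spec_transform text encode out) := by unfold Spec_transform; infer_instance

-- ===== CLAIM (what is proved, stated in full; the proofs are below) =====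
def Claim_equal_transform : Prop := ∀ (text : String) (encode : Bool), Dom_transform text encode → Spec_transform text encode (transform text encode)

-- ===== LEMMAS AND PROOFS =====

-- the composition of B's three per-character pass functions agrees with A's per-character
-- function on every ASCII character
set_option maxRecDepth 8000 in
theorem char_agree : ∀ e : Bool, ∀ n ∈ List.range 127,
    (rollPass e (rollPass e (rollPass e [Char.ofNat n]
        "abcdefghijklmnopqrstuvwxyz".toList) "ABCDEFGHIJKLMNOPQRSTUVWXYZ".toList) "0123456789".toList)
      = [transformChar (if e then 1 else -1) (Char.ofNat n)] := by decide

theorem char_agree' (e : Bool) (c : Char) (h : c.toNat < 127) :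
    (rollPass e (rollPass e (rollPass e [c]
        "abcdefghijklmnopqrstuvwxyz".toList) "ABCDEFGHIJKLMNOPQRSTUVWXYZ".toList) "0123456789".toList)
      = [transformChar (if e then 1 else -1) c] := by
  have := char_agree e c.toNat (List.mem_range.mpr h)
  rwa [Char.ofNat_toNat] at this

-- each staged pass is a map over the characters, so the three passes compose pointwise
theorem passes_map (e : Bool) (l : List Char) :
    rollPass e (rollPass e (rollPass e l
        "abcdefghijklmnopqrstuvwxyz".toList) "ABCDEFGHIJKLMNOPQRSTUVWXYZ".toList) "0123456789".toList
      = l.map (fun c =>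
          (rollPass e (rollPass e (rollPass e [c]
              "abcdefghijklmnopqrstuvwxyz".toList) "ABCDEFGHIJKLMNOPQRSTUVWXYZ".toList) "0123456789".toList).headD c) := by
  induction l with
  | nil => rfl
  | cons c t ih =>
    simp only [rollPass, List.map_cons] at *
    simp

-- ===== VERDICT (by name: the statement is the Claim_ definition above) =====
theorem transform_spec : Claim_equal_transform := by
  intro text encode hdom
  unfold Spec_transform transform transform_alt
  simp only [List.foldl_cons, List.foldl_nil]
  rw [passes_map]
  refine congrArg String.mk (List.map_congr_left ?_)
  intro c hc
  have hd : pvDomChar c = true := (List.all_eq_true.mp hdom) c hc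
  have hlt : c.toNat < 127 := by
    simp only [pvDomChar, Bool.or_eq_true, Bool.and_eq_true, decide_eq_true_eq, beq_iff_eq] at hd
    omega
  rw [char_agree' encode c hlt]
  rfl
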